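-- pv_equiv track=rewrite | github.com/shiyu2011/ml | algo.py | unique_string_detect
-- ===== SOURCE A (Python) =====
-- def unique_string_detect(st, k: int):
--     if len(st) < k:
--         return []
--     freq = {}
--     buf = []
--     res = []
--     #init the window
--     for j in range(k):
--         buf.append(st[j])
--         freq[st[j]] = freq.get(st[j], 0) + 1
--     status = True
--     for key in freq:
--         status = status and freq[key] == 1
--     if status == True:
--         res.append(buf)
--
--     for i in range(1, len(st)):
--         buf = []
--         status = True
--         #check the first
--         freq[st[i-1]] = freq.get(st[i-1], 0) - 1
--         if freq[st[i-1]] == 0: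
--             del freq[st[i-1]]
--         #add the last
--         if i + k >= len(st):
--             break
--         freq[st[i + k]] = freq.get(st[i + k], 0) + 1
--         for j in range(i, i + k):
--             buf.append(st[j])
--         status = True
--         for key in freq:
--             status = status and freq[key] == 1
--         if status == True:
--             res.append(buf)
--
--     return res
-- ===== SOURCE B (Python) =====
-- def unique_string_detect(st, k: int):
--     n = len(st)
--     if n < k:
--         return []
--     freq = {}
--     bad = 0  # number of entries of freq whose count is not 1
--
--     def put(c, v):
--         nonlocal bad
--         if c in freq and freq[c] != 1:
--             bad -= 1
--         if v != 1:
--             bad += 1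
--         freq[c] = v
--
--     for c in st[:k]:
--         put(c, freq.get(c, 0) + 1)
--     res = []
--     if bad == 0:
--         res.append(list(st[:k]))
--     for i in range(1, n - k):
--         out, inc = st[i - 1], st[i + k]
--         v = freq.get(out, 0) - 1
--         if v == 0:           # the entry had count 1, so it was not bad
--             del freq[out]
--         else:
--             put(out, v)
--         put(inc, freq.get(inc, 0) + 1)
--         if bad == 0:
--             res.append(list(st[i:i + k]))
--     return res
-- ===== Notes on version B (the rewrite author's own statement) =====
-- stated objective: faster
-- what changed: B replaces A's per-step full scan of the frequency dict and unconditional O(k) window rebuild by an incrementally maintained count of dict entries whose value is not 1 (O(1) per step), slicing a window out only when it qualifies; Pre_ restricts to non-negative window size k >= 0, the task's natural domain -- for k < 0 A's returned windows come from negative-index wraparound into the counter, an accident of its implementation.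
-- outside the precondition, e.g. on unique_string_detect('abc', -1): A returns [[]], B returns [['a', 'b'], [], []]
import Mathlib
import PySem

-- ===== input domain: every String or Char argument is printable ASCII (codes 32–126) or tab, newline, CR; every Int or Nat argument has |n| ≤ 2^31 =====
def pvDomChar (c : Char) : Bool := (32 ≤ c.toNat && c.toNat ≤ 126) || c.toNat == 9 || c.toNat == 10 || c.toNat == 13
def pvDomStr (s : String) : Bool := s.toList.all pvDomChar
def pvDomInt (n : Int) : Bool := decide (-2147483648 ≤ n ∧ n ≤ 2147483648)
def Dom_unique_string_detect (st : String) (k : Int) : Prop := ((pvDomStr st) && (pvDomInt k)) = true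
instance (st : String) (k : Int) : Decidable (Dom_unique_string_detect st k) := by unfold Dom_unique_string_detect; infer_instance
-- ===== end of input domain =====

-- B replaces A's per-window O(k) rebuild and full scan of the counter dict by an O(1) incremental
-- "number of entries with count ≠ 1" counter, slicing a window out only when it qualifies.

-- ===== PORT A =====

-- st[i] as a one-character string (the default branch is unreachable under Pre_)
def usdChar (cs : List Char) (i : Int) : String :=
  match PySem.List.pyGet? cs i with
  | some c => String.ofList [c]
  | none => ""

-- status = True; for key in freq: status = status and freq[key] == 1
def usdStatus (freq : PySem.Dict String Int) : Bool :=
  freq.keys.foldl (fun s key => s && (freq.getD key 0 == 1)) true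

-- for i in range(1, len(st)): … with the break
def usdLoopA (cs : List Char) (k n : Int) :
    Nat → Int → PySem.Dict String Int → List (List String) → List (List String)
  | 0, _, _, res => res
  | steps+1, i, freq, res =>
    let c1 := usdChar cs (i-1)
    let f1 := freq.insert c1 (freq.getD c1 0 - 1)
    let f2 := if f1.getD c1 0 == 0 then f1.erase c1 else f1
    if n ≤ i + k then res
    else
      let c2 := usdChar cs (i+k)
      let f3 := f2.insert c2 (f2.getD c2 0 + 1)
      let buf := (PySem.List.pyRange i (i+k)).foldl (fun b j => b ++ [usdChar cs j]) []
      usdLoopA cs k n steps (i+1) f3 (if usdStatus f3 then res ++ [buf] else res)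

def unique_string_detect (st : String) (k : Int) : List (List String) :=
  let cs := st.toList
  let n : Int := cs.length
  if n < k then []
  else
    let init := (PySem.List.pyRange 0 k).foldl
      (fun (p : List String × PySem.Dict String Int) j =>
        (p.1 ++ [usdChar cs j], p.2.insert (usdChar cs j) (p.2.getD (usdChar cs j) 0 + 1)))
      ([], PySem.Dict.empty)
    let res := if usdStatus init.2 then [init.1] else []
    usdLoopA cs k n (n-1).toNat 1 init.2 res

-- ===== PORT B =====

-- put(c, v): store freq[c] = v, keeping bad = number of entries whose count is not 1
def usdPut (freq : PySem.Dict String Int) (bad : Int) (c : String) (v : Int) :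
    PySem.Dict String Int × Int :=
  let bad1 := if freq.contains c = true ∧ freq.getD c 0 ≠ 1 then bad - 1 else bad
  let bad2 := if v ≠ 1 then bad1 + 1 else bad1
  (freq.insert c v, bad2)

-- list(st[i:i+k])
def usdWindow (cs : List Char) (i k : Int) : List String :=
  (PySem.List.slice cs (some i) (some (i+k))).map (fun c => String.ofList [c])

-- for i in range(1, n - k): …
def usdLoopB (cs : List Char) (k n : Int) :
    Nat → Int → PySem.Dict String Int → Int → List (List String) → List (List String)
  | 0, _, _, _, res => res
  | steps+1, i, freq, bad, res =>
    if i < n - k then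
      let out := usdChar cs (i-1)
      let inc := usdChar cs (i+k)
      let v := freq.getD out 0 - 1
      let p1 := if v = 0 then (freq.erase out, bad) else usdPut freq bad out v
      let p2 := usdPut p1.1 p1.2 inc (p1.1.getD inc 0 + 1)
      usdLoopB cs k n steps (i+1) p2.1 p2.2
        (if p2.2 = 0 then res ++ [usdWindow cs i k] else res)
    else res

def unique_string_detect_alt (st : String) (k : Int) : List (List String) :=
  let cs := st.toList
  let n : Int := cs.length
  if n < k then []
  else
    let pre := (PySem.List.slice cs none (some k)).map (fun c => String.ofList [c])
    let init := pre.foldl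
      (fun (p : PySem.Dict String Int × Int) c => usdPut p.1 p.2 c (p.1.getD c 0 + 1))
      (PySem.Dict.empty, 0)
    let res := if init.2 = 0 then [pre] else []
    usdLoopB cs k n (n-1).toNat 1 init.1 init.2 res

-- ===== PRECONDITION & SPEC =====
-- Pre_ restricts to non-negative window size k ≥ 0, the task's natural domain; for k < 0 A's
-- returned windows come from negative-index wraparound into the counter and negative ranges, an
-- accident of its implementation.
def Pre_unique_string_detect (st : String) (k : Int) : Prop := 0 ≤ k
instance (st : String) (k : Int) : Decidable (Pre_unique_string_detect st k) := by
  unfold Pre_unique_string_detect; infer_instance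

def pvWitness_unique_string_detect : String × Int := ("abcab", 3)

def Spec_unique_string_detect (st : String) (k : Int) (out : List (List String)) : Prop :=
  out = unique_string_detect_alt st k
instance (st : String) (k : Int) (out : List (List String)) :
    Decidable (Spec_unique_string_detect st k out) := by
  unfold Spec_unique_string_detect; infer_instance

-- ===== CLAIM (what is proved, stated in full; the proofs are below) =====
def Claim_equal_unique_string_detect : Prop :=
  ∀ (st : String) (k : Int), Dom_unique_string_detect st k →
    Pre_unique_string_detect st k →
    Spec_unique_string_detect st k (unique_string_detect st k)

-- ===== LEMMAS AND PROOFS =====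

-- bad as a function of the dict: number of stored values ≠ 1
def usdCountBad (d : PySem.Dict String Int) : Int :=
  ((d.items.filter (fun p => p.2 != 1)).length : Int)

theorem usd_foldl_band (f : String → Bool) :
    ∀ (l : List String) (b : Bool), l.foldl (fun s x => s && f x) b = (b && l.all f) := by
  intro l; induction l with
  | nil => intro b; simp
  | cons x t ih => intro b; simp [List.foldl_cons, ih, Bool.and_assoc]

theorem usd_status_iff (d : PySem.Dict String Int) (h : d.keys.Nodup) :
    (usdStatus d = true) ↔ usdCountBad d = 0 := by
  unfold usdStatus usdCountBad
  rw [usd_foldl_band]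
  constructor
  · intro hall
    simp only [Bool.true_and, List.all_eq_true] at hall
    have : d.items.filter (fun p => p.2 != 1) = [] := by
      apply List.filter_eq_nil_iff.mpr
      intro p hp
      have h1 : d.getD p.1 0 = p.2 := PySem.Dict.getD_of_mem_items d (by simpa using hp) h 0
      have h2 : p.1 ∈ d.keys := PySem.Dict.mem_keys_of_mem_items d hp
      have := hall p.1 h2
      simp only [beq_iff_eq] at this
      simp [← h1, this]
    simp [this]
  · intro hz
    have hnil : d.items.filter (fun p => p.2 != 1) = [] := by
      have := hz
      simp only [Int.natCast_eq_zero, List.length_eq_zero_iff] at this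
      exact this
    have hall : ∀ p ∈ d.items, p.2 = 1 := by
      intro p hp
      have := List.filter_eq_nil_iff.mp hnil p hp
      simpa using this
    simp only [Bool.true_and, List.all_eq_true]
    intro key hk
    have : key ∈ d.items.map Prod.fst := hk
    obtain ⟨p, hp, hfst⟩ := List.mem_map.mp this
    have h1 : d.getD p.1 0 = p.2 := PySem.Dict.getD_of_mem_items d (by simpa using hp) h 0
    simp [← hfst, h1, hall p hp]

-- the replaced entry's badness moves out, v's moves in
theorem usd_nbad_replace (c : String) (v : Int) :
    ∀ (l : List (String × Int)) (old : Int), (l.map Prod.fst).Nodup →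
      l.find? (fun p => p.1 == c) = some (c, old) →
      ((l.map (fun p => if p.1 == c then (c, v) else p)).filter (fun p => p.2 != 1)).length
        + (if old ≠ 1 then 1 else 0)
      = (l.filter (fun p => p.2 != 1)).length + (if v ≠ 1 then 1 else 0) := by
  intro l; induction l with
  | nil => intro old _ hf; simp at hf
  | cons q t ih =>
    intro old hnd hf
    have hnd' := hnd
    simp only [List.map_cons, List.nodup_cons] at hnd'
    obtain ⟨hq, hndt⟩ := hnd'
    by_cases hc : q.1 = c
    · have hfq : q = (c, old) := by
        rw [List.find?_cons_of_pos (by simp [hc])] at hf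
        exact Option.some.inj hf
      have hmap : t.map (fun p => if (p.1 == c) = true then (c, v) else p) = t := by
        conv_rhs => rw [← List.map_id t]
        apply List.map_congr_left
        intro p hp
        have hpc : p.1 ≠ c := by
          intro hpc
          apply hq
          rw [hc, ← hpc]
          exact List.mem_map_of_mem hp
        simp [hpc]
      subst hfq
      rw [List.map_cons, if_pos (show (((c, old).1 : String) == c) = true by simp), hmap,
        List.filter_cons, List.filter_cons]
      by_cases hv : v = 1 <;> by_cases ho : old = 1 <;> simp [hv, ho]
    · rw [List.find?_cons_of_neg (by simp [hc])] at hf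
      have hih := ih old hndt hf
      rw [List.map_cons, if_neg (show ¬((q.1 == c) = true) by simp [hc]),
        List.filter_cons, List.filter_cons]
      by_cases hq2 : q.2 = 1 <;> simp [hq2] at hih ⊢ <;> omega

theorem usd_nbad_erase (c : String) :
    ∀ (l : List (String × Int)) (old : Int), (l.map Prod.fst).Nodup →
      l.find? (fun p => p.1 == c) = some (c, old) →
      ((l.filter (fun p => !(p.1 == c))).filter (fun p => p.2 != 1)).length
        + (if old ≠ 1 then 1 else 0)
      = (l.filter (fun p => p.2 != 1)).length := by
  intro l; induction l with
  | nil => intro old _ hf; simp at hf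
  | cons q t ih =>
    intro old hnd hf
    have hnd' := hnd
    simp only [List.map_cons, List.nodup_cons] at hnd'
    obtain ⟨hq, hndt⟩ := hnd'
    by_cases hc : q.1 = c
    · have hfq : q = (c, old) := by
        rw [List.find?_cons_of_pos (by simp [hc])] at hf
        exact Option.some.inj hf
      have hflt : t.filter (fun p => !(p.1 == c)) = t := by
        apply List.filter_eq_self.mpr
        intro p hp
        have hpc : p.1 ≠ c := by
          intro hpc
          apply hq
          rw [hc, ← hpc]
          exact List.mem_map_of_mem hp
        simp [hpc]
      subst hfq
      rw [List.filter_cons, if_neg (show ¬((!((c, old).1 == c)) = true) by simp), hflt,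
        List.filter_cons]
      by_cases ho : old = 1 <;> simp [ho]
    · rw [List.find?_cons_of_neg (by simp [hc])] at hf
      have hih := ih old hndt hf
      have hbc : (!(q.1 == c)) = true := by simp [hc]
      rw [List.filter_cons, if_pos hbc, List.filter_cons, List.filter_cons]
      by_cases hq2 : q.2 = 1 <;> simp [hq2] at hih ⊢ <;> omega

theorem usd_find?_of_getD (d : PySem.Dict String Int) (c : String)
    (hc : d.contains c = true) :
    d.items.find? (fun p => p.1 == c) = some (c, d.getD c 0) := by
  have h1 : (d.get? c).isSome := by
    rw [← PySem.Dict.contains_eq_isSome_get?]; exact hc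
  obtain ⟨v, hv⟩ := Option.isSome_iff_exists.mp h1
  have hfind : ∃ p, d.items.find? (fun q => q.1 == c) = some p ∧ p.2 = v := by
    unfold PySem.Dict.get? at hv
    obtain ⟨p, hp1, hp2⟩ := Option.map_eq_some_iff.mp hv
    exact ⟨p, hp1, hp2⟩
  obtain ⟨p, hp, hpv⟩ := hfind
  have hpc : p.1 = c := by
    have := List.find?_some hp
    simpa using this
  have hgd : d.getD c 0 = v := by
    rw [PySem.Dict.getD_eq_get?_getD, hv]; rfl
  rw [hp, hgd, ← hpv, ← hpc]

-- countBad through d.insert c v (keys Nodup)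
theorem usd_countBad_insert (d : PySem.Dict String Int) (c : String) (v : Int)
    (h : d.keys.Nodup) :
    usdCountBad (d.insert c v)
      + (if d.contains c = true ∧ d.getD c 0 ≠ 1 then 1 else 0)
    = usdCountBad d + (if v ≠ 1 then 1 else 0) := by
  unfold usdCountBad
  by_cases hc : d.contains c = true
  · rw [PySem.Dict.items_insert, if_pos hc]
    have hf := usd_find?_of_getD d c hc
    have hrep := usd_nbad_replace c v d.items (d.getD c 0) h hf
    by_cases ho : d.getD c 0 = 1 <;> by_cases hv : v = 1 <;>
      simp [hc, ho, hv] at hrep ⊢ <;> omega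
  · rw [PySem.Dict.items_insert, if_neg hc]
    have hcf : d.contains c = false := by simpa using hc
    rw [List.filter_append]
    by_cases hv : v = 1 <;> simp [hv, hcf] <;> omega

-- countBad through erasing an entry of value 1
theorem usd_countBad_erase_one (d : PySem.Dict String Int) (c : String)
    (h : d.keys.Nodup) (hc : d.contains c = true) (ho : d.getD c 0 = 1) :
    usdCountBad (d.erase c) = usdCountBad d := by
  unfold usdCountBad
  have hf := usd_find?_of_getD d c hc
  rw [ho] at hf
  have h2 := usd_nbad_erase c d.items 1 h hf
  simp only [ne_eq, not_true_eq_false, if_false, add_zero] at h2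
  have h3 : (d.erase c).items = d.items.filter (fun p => !(p.1 == c)) := rfl
  rw [h3, h2]

theorem usd_erase_insert_self (d : PySem.Dict String Int) (c : String) (v : Int) :
    (d.insert c v).erase c = d.erase c := by
  have key : ∀ (l : List (String × Int)),
      (l.map (fun p => if (p.1 == c) = true then (c, v) else p)).filter (fun p => !(p.1 == c))
        = l.filter (fun p => !(p.1 == c)) := by
    intro l; induction l with
    | nil => simp
    | cons q t ih =>
      by_cases h : q.1 = c
      · rw [List.map_cons, if_pos (by simp [h]), List.filter_cons, List.filter_cons,
          if_neg (by simp), if_neg (by simp [h]), ih]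
      · rw [List.map_cons, if_neg (by simp [h]), List.filter_cons, List.filter_cons,
          if_pos (by simp [h]), if_pos (by simp [h]), ih]
  apply PySem.Dict.ext
  by_cases hc : d.contains c = true
  · have h1 : ((d.insert c v).erase c).items
        = ((d.items.map (fun p => if (p.1 == c) = true then (c, v) else p)).filter
            (fun p => !(p.1 == c))) := by
      simp only [PySem.Dict.erase, PySem.Dict.items_insert, if_pos hc]
    rw [h1, key d.items]
    rfl
  · have h1 : ((d.insert c v).erase c).items
        = (d.items ++ [(c, v)]).filter (fun p => !(p.1 == c)) := by
      simp only [PySem.Dict.erase, PySem.Dict.items_insert, if_neg hc]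
    rw [h1, List.filter_append]
    have h2 : ([((c : String), (v : Int))].filter (fun p => !(p.1 == c))) = [] := by simp
    rw [h2, List.append_nil]
    rfl

theorem usd_nodup_keys_erase (d : PySem.Dict String Int) (c : String)
    (h : d.keys.Nodup) : (d.erase c).keys.Nodup := by
  have hsub : ((d.erase c).keys).Sublist d.keys := by
    simp only [PySem.Dict.keys, PySem.Dict.erase]
    exact (List.filter_sublist).map Prod.fst
  exact hsub.nodup h

-- B's put agrees with insert and keeps bad = countBad
theorem usd_put_step (d : PySem.Dict String Int) (c : String) (v : Int) (h : d.keys.Nodup) :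
    usdPut d (usdCountBad d) c v = (d.insert c v, usdCountBad (d.insert c v))
      ∧ (d.insert c v).keys.Nodup := by
  simp only [usdPut]
  refine ⟨?_, PySem.Dict.nodup_keys_insert d c _ h⟩
  simp only [Prod.mk.injEq, true_and]
  have hins := usd_countBad_insert d c v h
  by_cases hc : d.contains c = true <;>
    by_cases ho : d.getD c 0 = 1 <;>
      by_cases hv : v = 1 <;>
        simp [hc, ho, hv] at hins ⊢ <;> omega

-- B's remove branch agrees with A's decrement-then-maybe-delete
theorem usd_remove_step (d : PySem.Dict String Int) (c : String) (h : d.keys.Nodup) :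
    (if d.getD c 0 - 1 = 0 then (d.erase c, usdCountBad d)
     else usdPut d (usdCountBad d) c (d.getD c 0 - 1))
      = ((if ((d.insert c (d.getD c 0 - 1)).getD c 0 == 0) = true
            then (d.insert c (d.getD c 0 - 1)).erase c
            else d.insert c (d.getD c 0 - 1)),
         usdCountBad (if ((d.insert c (d.getD c 0 - 1)).getD c 0 == 0) = true
            then (d.insert c (d.getD c 0 - 1)).erase c
            else d.insert c (d.getD c 0 - 1)))
      ∧ (if ((d.insert c (d.getD c 0 - 1)).getD c 0 == 0) = true
            then (d.insert c (d.getD c 0 - 1)).erase c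
            else d.insert c (d.getD c 0 - 1)).keys.Nodup := by
  have hget : (d.insert c (d.getD c 0 - 1)).getD c 0 = d.getD c 0 - 1 :=
    PySem.Dict.getD_insert_self d c _ 0
  by_cases ho : d.getD c 0 = 1
  · have hc : d.contains c = true := by
      by_contra hcf
      simp only [Bool.not_eq_true] at hcf
      rw [PySem.Dict.getD_of_not_contains d 0 hcf] at ho
      omega
    have hif : ((d.insert c (d.getD c 0 - 1)).getD c 0 == 0) = true := by
      rw [hget]; simp [ho]
    rw [if_pos (show d.getD c 0 - 1 = 0 by omega), if_pos hif, usd_erase_insert_self]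
    refine ⟨?_, usd_nodup_keys_erase d c h⟩
    rw [usd_countBad_erase_one d c h hc ho]
  · have hif : ¬ (((d.insert c (d.getD c 0 - 1)).getD c 0 == 0) = true) := by
      rw [hget]; simp only [beq_iff_eq]; omega
    rw [if_neg (show ¬ (d.getD c 0 - 1 = 0) by omega), if_neg hif]
    obtain ⟨hp, hnd⟩ := usd_put_step d c (d.getD c 0 - 1) h
    exact ⟨hp, hnd⟩

-- the window built index by index is the slice (indices in range)
theorem usd_window_nat (cs : List Char) (a m : Nat) (h : a + m ≤ cs.length) :
    (PySem.List.pyRange (a : Int) ((a : Int) + (m : Int))).map (fun j => usdChar cs j)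
      = ((cs.drop a).take m).map (fun c => String.ofList [c]) := by
  induction m generalizing a with
  | zero =>
    have : PySem.List.pyRange (a : Int) ((a : Int) + 0) = [] := by
      simp [PySem.List.pyRange]
    simp
  | succ m ih =>
    have hlt : (a : Int) < (a : Int) + ((m : Int) + 1) := by omega
    rw [show ((a : Int) + ((m : Int) + 1)) = ((a : Int) + (↑(m+1) : Int)) by push_cast; ring] at *
    rw [PySem.List.pyRange_one_cons (by push_cast; omega)]
    have ha : a < cs.length := by omega
    have hdrop : cs.drop a = cs[a] :: cs.drop (a+1) := List.drop_eq_getElem_cons ha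
    have hchar : usdChar cs (a : Int) = String.ofList [cs[a]] := by
      unfold usdChar
      have : PySem.List.pyGet? cs (a : Int) = some cs[a] := by
        simp [PySem.List.pyGet?, PySem.List.pyIdx?, ha]
      rw [this]
    have ih' := ih (a+1) (by omega)
    rw [List.map_cons, hchar, hdrop]
    simp only [List.take_succ_cons, List.map_cons]
    rw [show ((a : Int) + 1) = ((a+1 : Nat) : Int) by push_cast; ring]
    rw [show ((a : Int) + (↑(m+1) : Int)) = ((a+1 : Nat) : Int) + (m : Int) by push_cast; ring]
    rw [ih']

theorem usd_buf_eq_window (cs : List Char) (k i n : Int)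
    (hk : 0 ≤ k) (hn : n = (cs.length : Int))
    (hi : 1 ≤ i) (hik : i + k < n) :
    (PySem.List.pyRange i (i+k)).foldl (fun b j => b ++ [usdChar cs j]) []
      = usdWindow cs i k := by
  rw [PySem.List.foldl_append_singleton_eq_map]
  unfold usdWindow
  have hin : (0:Int) ≤ i := by omega
  have hkn : (0:Int) ≤ k := by omega
  obtain ⟨a, rfl⟩ := Int.eq_ofNat_of_zero_le hin
  obtain ⟨m, rfl⟩ := Int.eq_ofNat_of_zero_le hkn
  have hle : a + m ≤ cs.length := by omega
  rw [show ((a : Int) + (m : Int)) = ((a + m : Nat) : Int) by push_cast; ring]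
  rw [PySem.List.slice_natCast]
  rw [show ((a + m : Nat) : Int) = ((a : Int) + (m : Int)) by push_cast; ring]
  rw [usd_window_nat cs a m hle, Nat.add_sub_cancel_left, List.nil_append]

-- the qualifying test rewritten through the invariant
theorem usd_res_step {α : Type} (f : PySem.Dict String Int) (hnd : f.keys.Nodup)
    (x y : α) :
    (if usdStatus f = true then x else y)
      = (if usdCountBad f = 0 then x else y) := by
  by_cases hz : usdCountBad f = 0
  · rw [if_pos ((usd_status_iff f hnd).mpr hz), if_pos hz]
  · rw [if_neg (fun hs => hz ((usd_status_iff f hnd).mp hs)), if_neg hz]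

-- the main loops agree step for step
theorem usd_loop_eq (cs : List Char) (k n : Int)
    (hk : 0 ≤ k) (hn : n = (cs.length : Int)) :
    ∀ (steps : Nat) (i : Int) (freq : PySem.Dict String Int) (res : List (List String)),
      1 ≤ i → freq.keys.Nodup →
      usdLoopA cs k n steps i freq res
        = usdLoopB cs k n steps i freq (usdCountBad freq) res := by
  intro steps
  induction steps with
  | zero => intro i freq res _ _; rfl
  | succ m ih =>
    intro i freq res hi hnd
    simp only [usdLoopA, usdLoopB]
    by_cases hbr : n ≤ i + k
    · rw [if_pos hbr, if_neg (show ¬ (i < n - k) by omega)]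
    · rw [if_neg hbr, if_pos (show i < n - k by omega)]
      obtain ⟨hrm, hrmnd⟩ := usd_remove_step freq (usdChar cs (i-1)) hnd
      obtain ⟨hadd, haddnd⟩ := usd_put_step _ (usdChar cs (i+k)) _ hrmnd
      rw [hrm]
      dsimp only
      rw [hadd]
      rw [usd_buf_eq_window cs k i n hk hn hi (by omega)]
      rw [usd_res_step _ haddnd]
      exact ih (i+1) _ _ (by omega) haddnd

-- the initialisation folds agree (over any list of keys)
theorem usd_init_eq (l : List String) :
    ∀ (d : PySem.Dict String Int), d.keys.Nodup →
      (l.foldl (fun (p : PySem.Dict String Int × Int) c => usdPut p.1 p.2 c (p.1.getD c 0 + 1))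
        (d, usdCountBad d))
      = (l.foldl (fun d c => d.insert c (d.getD c 0 + 1)) d,
         usdCountBad (l.foldl (fun d c => d.insert c (d.getD c 0 + 1)) d))
      ∧ (l.foldl (fun d c => d.insert c (d.getD c 0 + 1)) d).keys.Nodup := by
  induction l with
  | nil => intro d h; exact ⟨rfl, h⟩
  | cons x t ih =>
    intro d h
    obtain ⟨hstep, hnd⟩ := usd_put_step d x (d.getD x 0 + 1) h
    simp only [List.foldl_cons, hstep]
    exact ih _ hnd

theorem usd_countBad_empty : usdCountBad (PySem.Dict.empty : PySem.Dict String Int) = 0 := by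
  rfl

theorem usd_nodup_keys_empty : (PySem.Dict.empty : PySem.Dict String Int).keys.Nodup := by
  simp [PySem.Dict.empty, PySem.Dict.keys]

-- st[:k] as the index-by-index prefix
theorem usd_init_buf (cs : List Char) (k : Int)
    (hk : 0 ≤ k) (hkn : k ≤ (cs.length : Int)) :
    (PySem.List.pyRange 0 k).map (fun j => usdChar cs j)
      = (PySem.List.slice cs none (some k)).map (fun c => String.ofList [c]) := by
  obtain ⟨m, rfl⟩ := Int.eq_ofNat_of_zero_le (by omega : (0:Int) ≤ k)
  rw [PySem.List.slice_to cs (by omega)]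
  have h0 := usd_window_nat cs 0 m (by omega)
  simp only [Nat.cast_zero, zero_add, List.drop_zero] at h0
  rw [h0]
  simp

-- ===== VERDICT (by name: the statement is the Claim_ definition above) =====
theorem unique_string_detect_spec : Claim_equal_unique_string_detect := by
  unfold Claim_equal_unique_string_detect
  intro st k _ hpre
  unfold Pre_unique_string_detect at hpre
  unfold Spec_unique_string_detect
  dsimp only [unique_string_detect, unique_string_detect_alt]
  set cs := st.toList with hcs
  set n : Int := (cs.length : Int) with hn
  by_cases hlt : n < k
  · rw [if_pos hlt, if_pos hlt]
  · rw [if_neg hlt, if_neg hlt]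
    rw [PySem.List.foldl_prod_mk (fun (b : List String) (j : Int) => b ++ [usdChar cs j])
      (fun (d : PySem.Dict String Int) (j : Int) =>
        d.insert (usdChar cs j) (d.getD (usdChar cs j) 0 + 1))
      (PySem.List.pyRange 0 k) [] PySem.Dict.empty]
    have hbuf : (PySem.List.pyRange 0 k).foldl (fun b j => b ++ [usdChar cs j]) []
        = (PySem.List.slice cs none (some k)).map (fun c => String.ofList [c]) := by
      rw [PySem.List.foldl_append_singleton_eq_map, List.nil_append]
      exact usd_init_buf cs k hpre (by omega)
    have hfree : (PySem.List.pyRange 0 k).foldl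
        (fun (d : PySem.Dict String Int) j =>
          d.insert (usdChar cs j) (d.getD (usdChar cs j) 0 + 1)) PySem.Dict.empty
        = ((PySem.List.slice cs none (some k)).map (fun c => String.ofList [c])).foldl
            (fun (d : PySem.Dict String Int) c => d.insert c (d.getD c 0 + 1))
            PySem.Dict.empty := by
      rw [← usd_init_buf cs k hpre (by omega), List.foldl_map]
    obtain ⟨hinit1, hinit2⟩ :=
      usd_init_eq ((PySem.List.slice cs none (some k)).map (fun c => String.ofList [c]))
        PySem.Dict.empty usd_nodup_keys_empty
    rw [usd_countBad_empty] at hinit1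
    dsimp only
    rw [hinit1, hbuf, hfree]
    rw [usd_res_step _ (by rw [← hfree] at hinit2 ⊢; exact hinit2)]
    rw [← hfree] at hinit2
    rw [← hfree]
    exact usd_loop_eq cs k n hpre hn (n-1).toNat 1 _ _ (by norm_num) hinit2
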